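-- pv_equiv track=rewrite | github.com/jgs159/gba-background-studio | core/main.py | parse_selected_palettes
-- ===== SOURCE A (Python) =====
-- def parse_selected_palettes(value):
--     """Parse selected palettes: '0,1,3,6,7,8' → [0,1,3,6,7,8]"""
--     if not value:
--         return [0]
--     try:
--         indices = [int(x.strip()) for x in value.split(",") if x.strip()]
--         if not all(0 <= i <= 15 for i in indices):
--             raise ValueError("Index out of range")
--         return sorted(set(indices))
--     except:
--         return None
-- ===== SOURCE B (Python) =====
-- def parse_selected_palettes(value):
--     """Parse selected palettes: '0,1,3,6,7,8' -> [0,1,3,6,7,8]"""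
--     if not value:
--         return [0]
--     present = [False] * 16
--     for tok in value.split(","):
--         t = tok.strip()
--         if not t:
--             continue
--         try:
--             i = int(t)
--         except ValueError:
--             return None
--         if not 0 <= i <= 15:
--             return None
--         present[i] = True
--     return [i for i in range(16) if present[i]]
-- ===== Notes on version B (the rewrite author's own statement) =====
-- stated objective: alternative
-- what changed: Replaces collect-all / validate-all / sorted(set(...)) with a single validating pass that marks a 16-entry boolean presence table, then reads the sorted unique result off a bounded bucket scan over range(16); no set and no comparison sort.
import Mathlib
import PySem

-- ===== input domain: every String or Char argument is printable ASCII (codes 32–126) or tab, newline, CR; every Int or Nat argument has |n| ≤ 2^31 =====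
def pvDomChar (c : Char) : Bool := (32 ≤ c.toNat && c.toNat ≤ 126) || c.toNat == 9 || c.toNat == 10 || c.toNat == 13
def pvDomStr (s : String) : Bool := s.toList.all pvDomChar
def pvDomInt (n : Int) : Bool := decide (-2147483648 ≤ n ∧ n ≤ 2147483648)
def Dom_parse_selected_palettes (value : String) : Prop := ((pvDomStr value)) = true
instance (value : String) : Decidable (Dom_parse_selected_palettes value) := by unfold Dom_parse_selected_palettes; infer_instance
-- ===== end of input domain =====

-- B replaces collect-all / validate-all / sorted(set(...)) with one validating pass marking a
-- 16-entry boolean presence table, read off by a bounded bucket scan (objective: alternative).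

-- ===== PORT A =====
-- the list comprehension [int(x.strip()) for x in value.split(",") if x.strip()]; none = ValueError
def pvParseAll : List (List Char) → Option (List Int)
  | [] => some []
  | x :: rest =>
    if PySem.Chars.strip x = [] then pvParseAll rest
    else
      match PySem.Int.ofChars? (PySem.Chars.strip x) with
      | none => none
      | some i => (pvParseAll rest).map (i :: ·)

def parse_selected_palettes (value : String) : Option (List Int) :=
  if value.toList = [] then some [0]
  else
    match pvParseAll (PySem.Chars.splitOn value.toList [',']) with
    | none => none
    | some indices =>
      if indices.all (fun i => decide (0 ≤ i ∧ i ≤ 15)) then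
        some (PySem.List.sorted (PySem.Set.ofList indices) (fun x => x))
      else none

-- ===== PORT B =====
-- the for-loop of Source B: strip, parse, validate, mark present[i] := True; none = the two 'return None's
def pvMark : List (List Char) → List Bool → Option (List Bool)
  | [], present => some present
  | tok :: rest, present =>
    let t := PySem.Chars.strip tok
    if t = [] then pvMark rest present
    else
      match PySem.Int.ofChars? t with
      | none => none
      | some i =>
        if 0 ≤ i ∧ i ≤ 15 then pvMark rest (present.set i.toNat true) else none

def parse_selected_palettes_alt (value : String) : Option (List Int) :=
  if value.toList = [] then some [0]
  else
    match pvMark (PySem.Chars.splitOn value.toList [',']) (List.replicate 16 false) with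
    | none => none
    | some present =>
      some ((PySem.List.pyRange 0 16).filter (fun i => present.getD i.toNat false))

-- ===== PRECONDITION & SPEC =====
def Spec_parse_selected_palettes (value : String) (out : Option (List Int)) : Prop := out = parse_selected_palettes_alt value
instance (value : String) (out : Option (List Int)) : Decidable (Spec_parse_selected_palettes value out) := by unfold Spec_parse_selected_palettes; infer_instance

-- ===== CLAIM (what is proved, stated in full; the proofs are below) =====
def Claim_equal_parse_selected_palettes : Prop := ∀ (value : String), Dom_parse_selected_palettes value → Spec_parse_selected_palettes value (parse_selected_palettes value)

-- ===== LEMMAS AND PROOFS =====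

-- B's marking loop, expressed through A's parse of the same tokens
theorem pvMark_eq (toks : List (List Char)) (present : List Bool) :
    pvMark toks present =
      match pvParseAll toks with
      | none => none
      | some idxs =>
        if idxs.all (fun i => decide (0 ≤ i ∧ i ≤ 15)) then
          some (idxs.foldl (fun p i => p.set i.toNat true) present)
        else none := by
  induction toks generalizing present with
  | nil => rfl
  | cons x rest ih =>
    simp only [pvMark, pvParseAll]
    by_cases hs : PySem.Chars.strip x = []
    · simp only [hs, if_true]; exact ih present
    · simp only [if_neg hs]
      cases hi : PySem.Int.ofChars? (PySem.Chars.strip x) with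
      | none => rfl
      | some i =>
        dsimp only
        rw [ih]
        by_cases hr : 0 ≤ i ∧ i ≤ 15
        · cases pvParseAll rest with
          | none => simp [hr]
          | some idxs => simp [hr]
        · cases pvParseAll rest with
          | none => simp [hr]
          | some idxs => simp [hr]

-- the presence table after the fold reads membership
theorem foldl_set_getD (idxs : List Int) (p : List Bool) (hlen : p.length = 16)
    (hall : ∀ i ∈ idxs, 0 ≤ i ∧ i ≤ 15) (j : Nat) :
    (idxs.foldl (fun p i => p.set i.toNat true) p).getD j false
      = (p.getD j false || decide ((j : Int) ∈ idxs)) := by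
  induction idxs generalizing p with
  | nil => simp
  | cons i rest ih =>
    have hi := hall i (by simp)
    simp only [List.foldl_cons]
    rw [ih (p.set i.toNat true) (by simp [hlen]) (fun k hk => hall k (by simp [hk]))]
    by_cases hij : i.toNat = j
    · have hji : (j : Int) = i := by omega
      have hjlt : j < p.length := by omega
      simp [hji, List.getD, hij, hjlt]
    · have hji : ¬ ((j : Int) = i) := by omega
      simp [List.getD, hij, hji]

-- sorted(set(idxs)) is the bucket scan, for in-range idxs
theorem sorted_set_eq_filter (idxs : List Int) (hall : ∀ i ∈ idxs, 0 ≤ i ∧ i ≤ 15) :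
    PySem.List.sorted (PySem.Set.ofList idxs) (fun x => x)
      = (PySem.List.pyRange 0 16).filter (fun j => decide (j ∈ idxs)) := by
  apply PySem.List.sorted_eq_of_perm_of_pairwise_lt
  · rw [List.perm_ext_iff_of_nodup ((PySem.List.nodup_pyRange_one 0 16).filter _)
        (PySem.Set.nodup_ofList idxs)]
    intro a
    simp only [List.mem_filter, PySem.List.mem_pyRange_one, PySem.Set.mem_ofList,
      decide_eq_true_eq]
    constructor
    · rintro ⟨_, h⟩; exact h
    · intro h; exact ⟨by have := hall a h; omega, h⟩
  · exact (PySem.List.pairwise_lt_pyRange_one 0 16).filter _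

-- ===== VERDICT (by name: the statement is the Claim_ definition above) =====
theorem parse_selected_palettes_spec : Claim_equal_parse_selected_palettes := by
  intro value _
  unfold Spec_parse_selected_palettes parse_selected_palettes parse_selected_palettes_alt
  by_cases h0 : value.toList = []
  · simp [h0]
  · simp only [if_neg h0]
    rw [pvMark_eq]
    cases hp : pvParseAll (PySem.Chars.splitOn value.toList [',']) with
    | none => rfl
    | some idxs =>
      by_cases hall : idxs.all (fun i => decide (0 ≤ i ∧ i ≤ 15))
      · have hall' : ∀ i ∈ idxs, 0 ≤ i ∧ i ≤ 15 := by
          intro i hi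
          have := List.all_eq_true.mp hall i hi
          simpa using this
        simp only [if_pos hall]
        rw [sorted_set_eq_filter idxs hall']
        congr 1
        apply List.filter_congr
        intro j hj
        have hjr := PySem.List.mem_pyRange_one.mp hj
        have hj' : ((j.toNat : Int)) = j := by omega
        rw [foldl_set_getD idxs (List.replicate 16 false) (by simp) hall' j.toNat]
        have hrep : (List.replicate 16 false).getD j.toNat false = false := by
          simp only [List.getD]
          rw [List.getElem?_replicate]
          split <;> rfl
        rw [hrep]
        simp [hj']
      · have h : ¬ ∀ x ∈ idxs, 0 ≤ x ∧ x ≤ 15 := by simpa using hall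
        simp [h]
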